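-- pv_equiv track=rewrite | github.com/CarlosChen1999/MHGCI | retrieved/data_process.py | evidence2triples
-- ===== SOURCE A (Python) =====
-- def evidence2triples(evidence):
--     triples = []
--     for entity1,relations1 in evidence.items():
--         for entity_relation1 in relations1:
--             search_relation=[]
--             for relation1 in entity_relation1:
--                 if '~' != relation1[0]:
--                     search_relation.append('~'+relation1)
--                 else:
--                     search_relation.append(relation1.replace('~', '', 1))
--             search_relation.sort()
--             flag=False
--             for entity2,relations2 in evidence.items():
--                 for entity_relation2 in relations2:
--                     entity_relation2.sort()
--                     if search_relation == entity_relation2: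
--                         flag=True
--                         for relation2 in entity_relation2:
--                             if '~' != relation2[0]:
--                                 if [entity2,relation2,entity1] not in triples:
--                                     triples.append([entity2,relation2,entity1])
--                             else:
--                                 if [entity1,relation2.replace('~', '', 1),entity2] not in triples:
--                                     triples.append([entity1,relation2.replace('~', '', 1),entity2])
--                         break
--                     # if search_relation == entity_relation2:
--                     #     flag=True
--                     #     if [entity2,entity_relation2,entity1] not in triples and [entity1,entity_relation1.sort(),entity2] not in triples :
--                     #         triples.append([entity2,entity_relation2,entity1])
--                     #     break
--             if flag==False:
--                 for relation1 in entity_relation1: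
--                     if '~' != relation1[0]:
--                         triples.append([entity1,relation1,'-'])
--                     else:
--                         triples.append(['-',relation1.replace('~', '', 1),entity1])
--                 # triples.append([entity1,entity_relation1,'-'])
--     return triples
-- ===== SOURCE B (Python) =====
-- def evidence2triples(evidence):
--     # Hash index: sorted-relation-tuple -> ordered list of entities having such a
--     # relation list; one pass with set-based dedup replaces A's nested rescans.
--     index = {}
--     for entity, relations in evidence.items():
--         seen = set()
--         for entity_relation in relations:
--             key = tuple(sorted(entity_relation))
--             if key not in seen:
--                 seen.add(key)
--                 index.setdefault(key, []).append(entity)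
--     triples = []
--     emitted = set()
--     for entity1, relations1 in evidence.items():
--         for entity_relation in relations1:
--             sig = sorted(('~' + r) if r[0] != '~' else r[1:] for r in entity_relation)
--             entities = index.get(tuple(sig))
--             if entities:
--                 for entity2 in entities:
--                     for rel in sig:
--                         if rel[0] != '~':
--                             triple = (entity2, rel, entity1)
--                         else:
--                             triple = (entity1, rel[1:], entity2)
--                         if triple not in emitted:
--                             emitted.add(triple)
--                             triples.append(list(triple))
--             else:
--                 for r in sorted(entity_relation):
--                     if r[0] != '~':
--                         emitted.add((entity1, r, '-'))
--                         triples.append([entity1, r, '-'])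
--                     else:
--                         emitted.add(('-', r[1:], entity1))
--                         triples.append(['-', r[1:], entity1])
--     return triples
-- ===== Notes on version B (the rewrite author's own statement) =====
-- stated objective: faster
-- what changed: B precomputes one hash index mapping each sorted relation signature to the ordered list of entities owning it and keeps a set of already-emitted triples, so each relation list is matched by a single dict lookup and each dedup check is O(1), instead of A's rescan of the whole evidence per relation list and its 'not in triples' list scans.
import Mathlib
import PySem

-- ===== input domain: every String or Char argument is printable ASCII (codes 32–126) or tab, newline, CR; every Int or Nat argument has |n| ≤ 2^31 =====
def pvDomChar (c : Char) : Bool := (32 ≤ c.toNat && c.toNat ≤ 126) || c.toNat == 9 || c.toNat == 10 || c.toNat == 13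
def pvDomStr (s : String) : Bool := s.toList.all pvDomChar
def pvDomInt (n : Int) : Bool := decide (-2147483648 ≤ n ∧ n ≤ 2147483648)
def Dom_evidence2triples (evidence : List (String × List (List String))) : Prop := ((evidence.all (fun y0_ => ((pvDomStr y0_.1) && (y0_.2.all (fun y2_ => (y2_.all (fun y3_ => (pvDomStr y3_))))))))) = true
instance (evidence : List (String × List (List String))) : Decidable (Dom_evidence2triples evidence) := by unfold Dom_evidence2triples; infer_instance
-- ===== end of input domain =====

-- B replaces A's quadratic rescans by a precomputed hash index (sorted relation
-- signature -> ordered entity list) and set-based dedup: objective 'faster'.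
-- A mutates its argument (sorts the inner relation lists in place); B does not:
-- the equivalence proved here is about the RETURN value only.

-- ===== PORT A =====

-- shared helper: the test `'~' != r[0]` (negated); Python raises IndexError on
-- "" — excluded by Pre_ below (pyGet? returns none there, read as non-'~').
def pvStartsTilde (s : String) : Bool := PySem.Str.pyGet? s 0 == some '~'

-- exact port of s.replace('~', '', 1): remove the first occurrence of '~', if any
def pvDropTilde1 : List Char → List Char
  | [] => []
  | c :: cs => if c = '~' then cs else c :: pvDropTilde1 cs
def pvReplaceTilde1 (s : String) : String := String.ofList (pvDropTilde1 s.toList)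

-- list.sort() / sorted(xs) on strings
def pvSortS (l : List String) : List String := PySem.List.sorted l (fun x => x) false

-- the inner `for relation2 in entity_relation2: … append with "not in" dedup`
def pvA_addTriples (tr : List (List String)) (entity1 entity2 : String)
    (er2s : List String) : List (List String) :=
  er2s.foldl (fun tr rel =>
    if pvStartsTilde rel = false then
      if tr.contains [entity2, rel, entity1] then tr else tr ++ [[entity2, rel, entity1]]
    else
      if tr.contains [entity1, pvReplaceTilde1 rel, entity2] then tr
      else tr ++ [[entity1, pvReplaceTilde1 rel, entity2]]) tr

-- `for entity_relation2 in relations2: entity_relation2.sort(); if …: …; break`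
-- (the in-place sort is modelled by rebuilding the traversed prefix, `done`)
def pvA_scanLists (entity1 : String) (sr : List String) (n2 : String)
    (done todo : List (List String)) (tr : List (List String)) (flag : Bool) :
    List (List String) × List (List String) × Bool :=
  match todo with
  | [] => (done, tr, flag)
  | er2 :: rest =>
    let er2s := pvSortS er2
    if sr == er2s then (done ++ er2s :: rest, pvA_addTriples tr entity1 n2 er2s, true)
    else pvA_scanLists entity1 sr n2 (done ++ [er2s]) rest tr flag

-- `for entity2, relations2 in evidence.items(): …`
def pvA_scanEntities (entity1 : String) (sr : List String)
    (done todo : List (String × List (List String))) (tr : List (List String)) (flag : Bool) :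
    List (String × List (List String)) × List (List String) × Bool :=
  match todo with
  | [] => (done, tr, flag)
  | (n2, rels2) :: rest =>
    let r := pvA_scanLists entity1 sr n2 [] rels2 tr flag
    pvA_scanEntities entity1 sr (done ++ [(n2, r.1)]) rest r.2.1 r.2.2

-- the `if flag==False:` fallback loop
def pvA_fallback (tr : List (List String)) (entity1 : String) (er1 : List String) :
    List (List String) :=
  er1.foldl (fun tr rel =>
    if pvStartsTilde rel = false then tr ++ [[entity1, rel, "-"]]
    else tr ++ [["-", pvReplaceTilde1 rel, entity1]]) tr

-- `for entity_relation1 in relations1` — positional, over the mutated evidence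
def pvA_listLoop (ev : List (String × List (List String))) (i : Nat)
    (tr : List (List String)) : List Nat → List (String × List (List String)) × List (List String)
  | [] => (ev, tr)
  | j :: rest =>
    let e1 := (ev.getD i ("", [])).1
    let er1 := (ev.getD i ("", [])).2.getD j []
    let sr := pvSortS (er1.foldl (fun acc r =>
      if pvStartsTilde r = false then acc ++ ["~" ++ r] else acc ++ [pvReplaceTilde1 r]) [])
    let s := pvA_scanEntities e1 sr [] ev tr false
    let tr' := if s.2.2 then s.2.1
               else pvA_fallback s.2.1 e1 ((s.1.getD i ("", [])).2.getD j [])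
    pvA_listLoop s.1 i tr' rest

-- `for entity1, relations1 in evidence.items()`
def pvA_entLoop (ev : List (String × List (List String))) (tr : List (List String)) :
    List Nat → List (String × List (List String)) × List (List String)
  | [] => (ev, tr)
  | i :: rest =>
    let p := pvA_listLoop ev i tr (List.range ((ev.getD i ("", [])).2.length))
    pvA_entLoop p.1 p.2 rest

def evidence2triples (evidence : List (String × List (List String))) : List (List String) :=
  (pvA_entLoop evidence [] (List.range evidence.length)).2

-- ===== PORT B =====

-- r[1:]
def pvStrTail (s : String) : String := PySem.Str.slice s (some 1) none

-- ('~' + r) if r[0] != '~' else r[1:]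
def pvB_invert (r : String) : String :=
  if pvStartsTilde r = false then "~" ++ r else pvStrTail r

-- index build: sorted-relation-tuple -> ordered entities (setdefault+append),
-- with a per-entity `seen` set so each entity enters a bucket at most once
def pvB_index (evidence : List (String × List (List String))) :
    PySem.Dict (List String) (List String) :=
  evidence.foldl (fun d p =>
    (p.2.foldl (fun (q : PySem.Dict (List String) (List String) × PySem.Set (List String)) er =>
        let key := pvSortS er
        if PySem.Set.contains q.2 key then q
        else (q.1.insert key (q.1.getD key [] ++ [p.1]), PySem.Set.add q.2 key))
      (d, PySem.Set.empty)).1) PySem.Dict.empty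

-- append triple unless already emitted (set-backed dedup)
def pvB_add (st : List (List String) × PySem.Set (List String)) (t : List String) :
    List (List String) × PySem.Set (List String) :=
  if PySem.Set.contains st.2 t then st else (st.1 ++ [t], PySem.Set.add st.2 t)

def evidence2triples_alt (evidence : List (String × List (List String))) : List (List String) :=
  let index := pvB_index evidence
  (evidence.foldl (fun st p =>
    p.2.foldl (fun st er =>
      let sig := pvSortS (er.map pvB_invert)
      let entities := index.getD sig []
      if entities.isEmpty then
        (pvSortS er).foldl (fun st r =>
          if pvStartsTilde r = false then
            (st.1 ++ [[p.1, r, "-"]], PySem.Set.add st.2 [p.1, r, "-"])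
          else
            (st.1 ++ [["-", pvStrTail r, p.1]], PySem.Set.add st.2 ["-", pvStrTail r, p.1])) st
      else
        entities.foldl (fun st e2 =>
          sig.foldl (fun st rel =>
            if pvStartsTilde rel = false then pvB_add st [e2, rel, p.1]
            else pvB_add st [p.1, pvStrTail rel, e2]) st) st) st)
    (([] : List (List String)), (PySem.Set.empty : PySem.Set (List String)))).1

-- ===== PRECONDITION & SPEC =====
-- Pre_ excludes (a) empty relation strings, on which A raises IndexError at
-- relation1[0], and (b) duplicate entity keys, which cannot arise from A's
-- Python dict argument.
def Pre_evidence2triples (evidence : List (String × List (List String))) : Prop :=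
  (evidence.map Prod.fst).Nodup ∧ ∀ p ∈ evidence, ∀ er ∈ p.2, ∀ r ∈ er, r ≠ ""
instance (evidence : List (String × List (List String))) : Decidable (Pre_evidence2triples evidence) := by unfold Pre_evidence2triples; infer_instance

def pvWitness_evidence2triples : (List (String × List (List String))) :=
  [("e1", [["a", "~b"]]), ("e2", [["~a", "b"]])]

def Spec_evidence2triples (evidence : List (String × List (List String))) (out : List (List String)) : Prop := out = evidence2triples_alt evidence
instance (evidence : List (String × List (List String))) (out : List (List String)) : Decidable (Spec_evidence2triples evidence out) := by unfold Spec_evidence2triples; infer_instance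

-- ===== CLAIM (what is proved, stated in full; the proofs are below) =====
def Claim_equal_evidence2triples : Prop := ∀ (evidence : List (String × List (List String))), Dom_evidence2triples evidence → Pre_evidence2triples evidence → Spec_evidence2triples evidence (evidence2triples evidence)

-- ===== LEMMAS AND PROOFS =====

-- A's inversion of a single relation
def pvAinv (r : String) : String :=
  if pvStartsTilde r = false then "~" ++ r else pvReplaceTilde1 r
-- the signature of a relation list, and its sort key
def pvSig (er : List String) : List String := pvSortS (er.map pvAinv)
-- the entities (in evidence order) owning a relation list with sorted form sr
def pvMatched (E : List (String × List (List String))) (sr : List String) : List String :=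
  (E.filter (fun p => p.2.any (fun er => sr == pvSortS er))).map Prod.fst
def pvEmit (tr : List (List String)) (e1 : String) (sr : List String)
    (names : List String) : List (List String) :=
  names.foldl (fun tr n2 => pvA_addTriples tr e1 n2 sr) tr
-- the pure per-relation-list step both programs implement
def pvStep (E : List (String × List (List String))) (tr : List (List String))
    (e1 : String) (er : List String) : List (List String) :=
  let ms := pvMatched E (pvSig er)
  if ms.isEmpty then pvA_fallback tr e1 (pvSortS er) else pvEmit tr e1 (pvSig er) ms
def pvSpec (E : List (String × List (List String))) : List (List String) :=
  E.foldl (fun tr p => p.2.foldl (fun tr er => pvStep E tr p.1 er) tr) []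

-- ---------- basic facts ----------
theorem pvSortS_perm (l : List String) : (pvSortS l).Perm l :=
  PySem.List.sorted_perm l (fun x => x) false

theorem pvSortS_congr {l l' : List String} (h : l.Perm l') : pvSortS l = pvSortS l' :=
  PySem.List.sorted_eq_sorted_of_perm l l' (fun x => x) (fun _ _ h => h) h

theorem pvTail_eq {r : String} (h : pvStartsTilde r = true) : pvReplaceTilde1 r = pvStrTail r := by
  unfold pvStartsTilde at h
  unfold pvReplaceTilde1 pvStrTail
  rw [beq_iff_eq] at h
  simp only [PySem.Str.pyGet?_eq, PySem.Chars.pyGet?_eq_listPyGet?] at h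
  have hs : ∃ cs, r.toList = '~' :: cs := by
    cases hr : r.toList with
    | nil => rw [hr] at h; simp [PySem.List.pyGet?, PySem.List.pyIdx?] at h
    | cons c cs =>
      rw [hr] at h
      simp [PySem.List.pyGet?, PySem.List.pyIdx?] at h
      exact ⟨cs, by rw [h]⟩
  obtain ⟨cs, hcs⟩ := hs
  apply String.toList_inj.mp
  simp [PySem.Str.toList_slice, PySem.Chars.slice_eq_listSlice, hcs, pvDropTilde1,
    PySem.List.slice_from_one]

theorem pvBinv_eq : pvB_invert = pvAinv := by
  funext r
  unfold pvB_invert pvAinv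
  cases h : pvStartsTilde r with
  | false => simp
  | true => simp [pvTail_eq h]

-- the relation "current evidence is the original with some inner lists re-ordered"
def pvRelE (E ev : List (String × List (List String))) : Prop :=
  List.Forall₂ (fun p q => p.1 = q.1 ∧ List.Forall₂ (fun x y : List String => x.Perm y) p.2 q.2) E ev

theorem pvRelE_refl (E : List (String × List (List String))) : pvRelE E E := by
  rw [pvRelE, List.forall₂_same]
  exact fun p _ => ⟨rfl, List.forall₂_same.mpr (fun x _ => List.Perm.refl x)⟩

theorem forall2_getD {α β : Type} {R : α → β → Prop} {xs : List α} {ys : List β}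
    (h : List.Forall₂ R xs ys) {d : α} {d' : β} (hd : R d d') (i : Nat) :
    R (xs.getD i d) (ys.getD i d') := by
  induction h generalizing i with
  | nil => simpa using hd
  | cons hxy _ ih => cases i with
    | zero => simpa using hxy
    | succ n => simpa using ih n

theorem pvPermL_trans {a b c : List (List String)}
    (h1 : List.Forall₂ (fun x y : List String => x.Perm y) a b)
    (h2 : List.Forall₂ (fun x y : List String => x.Perm y) b c) :
    List.Forall₂ (fun x y : List String => x.Perm y) a c := by
  induction h1 generalizing c with
  | nil => cases h2; exact List.Forall₂.nil
  | cons hp _ ih =>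
    cases h2 with
    | cons hq hr => exact List.Forall₂.cons (hp.trans hq) (ih hr)

theorem pvRelE_trans {E ev ev' : List (String × List (List String))}
    (h1 : pvRelE E ev) (h2 : pvRelE ev ev') : pvRelE E ev' := by
  unfold pvRelE at *
  induction h1 generalizing ev' with
  | nil => cases h2; exact List.Forall₂.nil
  | cons hxy _ ih =>
    cases h2 with
    | cons hyz hrest =>
      refine List.Forall₂.cons ⟨hxy.1.trans hyz.1, ?_⟩ (ih hrest)
      exact pvPermL_trans hxy.2 hyz.2

theorem anyKey_congr {xs ys : List (List String)}
    (h : List.Forall₂ (fun x y : List String => x.Perm y) xs ys) (sr : List String) :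
    (xs.any (fun er => sr == pvSortS er)) = (ys.any (fun er => sr == pvSortS er)) := by
  induction h with
  | nil => rfl
  | cons hxy _ ih => simp only [List.any_cons, ih, pvSortS_congr hxy]

theorem pvMatched_congr {E ev : List (String × List (List String))} (h : pvRelE E ev)
    (sr : List String) : pvMatched ev sr = pvMatched E sr := by
  unfold pvMatched
  induction h with
  | nil => rfl
  | @cons p q l1 l2 hxy _ ih =>
    simp only [List.filter_cons]
    rw [anyKey_congr hxy.2 sr]
    split <;> simp [ih, hxy.1]

-- ---------- A: the inner entity2 scan ----------
theorem scanLists_spec (e1 : String) (sr : List String) (n2 : String) :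
    ∀ (todo done : List (List String)) (tr : List (List String)) (flag : Bool),
    ∃ out, pvA_scanLists e1 sr n2 done todo tr flag =
      (done ++ out,
       if todo.any (fun er => sr == pvSortS er) then (pvA_addTriples tr e1 n2 sr, true)
       else (tr, flag))
    ∧ List.Forall₂ (fun x y : List String => x.Perm y) todo out
    ∧ (todo.any (fun er => sr == pvSortS er) = false → out = todo.map pvSortS) := by
  intro todo
  induction todo with
  | nil => intro done tr flag; exact ⟨[], by simp [pvA_scanLists], List.Forall₂.nil, by simp⟩
  | cons er2 rest ih =>
    intro done tr flag
    by_cases h : sr == pvSortS er2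
    · refine ⟨pvSortS er2 :: rest, ?_, ?_, ?_⟩
      · simp only [pvA_scanLists, h, List.any_cons, Bool.true_or, if_true]
        rw [eq_of_beq h]
      · exact List.Forall₂.cons ((pvSortS_perm er2).symm) (List.forall₂_same.mpr (fun x _ => List.Perm.refl x))
      · intro hn; simp [h] at hn
    · obtain ⟨out', heq, hperm, hnom⟩ := ih (done ++ [pvSortS er2]) tr flag
      refine ⟨pvSortS er2 :: out', ?_, ?_, ?_⟩
      · simp only [pvA_scanLists, h, Bool.false_eq_true, if_false, List.any_cons, Bool.false_or]
        simpa [List.append_assoc] using heq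
      · exact List.Forall₂.cons ((pvSortS_perm er2).symm) hperm
      · intro hn
        simp only [List.any_cons, Bool.or_eq_false_iff] at hn
        simp [hnom hn.2]

theorem scanEntities_spec (e1 : String) (sr : List String) :
    ∀ (todo done : List (String × List (List String))) (tr : List (List String)) (flag : Bool),
    ∃ out, pvA_scanEntities e1 sr done todo tr flag =
      (done ++ out,
       pvEmit tr e1 sr ((todo.filter (fun p => p.2.any (fun er => sr == pvSortS er))).map Prod.fst),
       flag || todo.any (fun p => p.2.any (fun er => sr == pvSortS er)))
    ∧ pvRelE todo out
    ∧ (todo.any (fun p => p.2.any (fun er => sr == pvSortS er)) = false →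
        out = todo.map (fun p => (p.1, p.2.map pvSortS))) := by
  intro todo
  induction todo with
  | nil =>
    intro done tr flag
    exact ⟨[], by simp [pvA_scanEntities, pvEmit], List.Forall₂.nil, by simp⟩
  | cons p rest ih =>
    obtain ⟨n2, rels2⟩ := p
    intro done tr flag
    obtain ⟨out1, heq1, hperm1, hnom1⟩ := scanLists_spec e1 sr n2 rels2 [] tr flag
    by_cases h : rels2.any (fun er => sr == pvSortS er)
    · obtain ⟨out', heq, hperm, hnom⟩ :=
        ih (done ++ [(n2, out1)]) (pvA_addTriples tr e1 n2 sr) true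
      refine ⟨(n2, out1) :: out', ?_, ?_, ?_⟩
      · simp only [pvA_scanEntities, heq1, h, if_true, List.nil_append]
        rw [heq]
        simp [pvEmit, h]

      · exact List.Forall₂.cons ⟨rfl, hperm1⟩ hperm
      · intro hn; simp [h] at hn
    · simp only [Bool.not_eq_true] at h
      obtain ⟨out', heq, hperm, hnom⟩ := ih (done ++ [(n2, out1)]) tr flag
      refine ⟨(n2, out1) :: out', ?_, ?_, ?_⟩
      · simp only [pvA_scanEntities, heq1, h, List.nil_append, Bool.false_eq_true,
          if_false, List.any_cons, Bool.false_or]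
        rw [heq]
        simp [h]
      · exact List.Forall₂.cons ⟨rfl, hperm1⟩ hperm
      · intro hn
        simp only [List.any_cons, Bool.or_eq_false_iff] at hn
        simp [hnom hn.2, hnom1 hn.1]

-- ---------- A: outer loops ----------
theorem foldl_range_getD {α β : Type} (xs : List α) (d : α) (f : β → α → β) :
    ∀ (init : β), (List.range xs.length).foldl (fun a k => f a (xs.getD k d)) init = xs.foldl f init := by
  suffices hmap : (List.range xs.length).map (fun k => xs.getD k d) = xs by
    intro init
    rw [← List.foldl_map, hmap]
  apply List.ext_getElem (by simp)
  intro i h1 h2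
  simp [List.getElem?_eq_getElem h2]

theorem getD_map_fix {α β : Type} (f : α → β) (d : α) (d' : β) (hf : f d = d') :
    ∀ (l : List α) (i : Nat), (l.map f).getD i d' = f (l.getD i d) := by
  intro l
  induction l with
  | nil => intro i; simp [hf]
  | cons x t ih => intro i; cases i with
    | zero => simp
    | succ n => simpa using ih n

theorem anyEnt_congr {E ev : List (String × List (List String))} (h : pvRelE E ev)
    (sr : List String) :
    (ev.any (fun p => p.2.any (fun er => sr == pvSortS er))) =
      (E.any (fun p => p.2.any (fun er => sr == pvSortS er))) := by
  induction h with
  | nil => rfl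
  | cons hxy _ ih => simp only [List.any_cons, ih, anyKey_congr hxy.2 sr]

theorem matched_isEmpty (E : List (String × List (List String))) (sr : List String) :
    (pvMatched E sr).isEmpty = !(E.any (fun p => p.2.any (fun er => sr == pvSortS er))) := by
  unfold pvMatched
  rcases hq : E.any (fun p => p.2.any (fun er => sr == pvSortS er)) with _ | _
  · have hnil : E.filter (fun p => p.2.any (fun er => sr == pvSortS er)) = [] := by
      apply List.filter_eq_nil_iff.mpr
      intro p hp
      have := List.any_eq_false.mp hq p hp
      simp [this]
    simp [hnil]
  · obtain ⟨p, hp, hsat⟩ := List.any_eq_true.mp hq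
    have hmem : p ∈ E.filter (fun p => p.2.any (fun er => sr == pvSortS er)) :=
      List.mem_filter.mpr ⟨hp, hsat⟩
    have : p.1 ∈ (E.filter (fun p => p.2.any (fun er => sr == pvSortS er))).map Prod.fst :=
      List.mem_map_of_mem hmem
    rw [Bool.not_true]
    exact List.isEmpty_eq_false_iff.mpr (List.ne_nil_of_mem this)

theorem foldinv_eq_map (er : List String) :
    er.foldl (fun acc r =>
      if pvStartsTilde r = false then acc ++ ["~" ++ r] else acc ++ [pvReplaceTilde1 r]) [] =
    er.map pvAinv := by
  have hb : (fun (acc : List String) r =>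
      if pvStartsTilde r = false then acc ++ ["~" ++ r] else acc ++ [pvReplaceTilde1 r]) =
      (fun acc r => acc ++ [pvAinv r]) := by
    funext acc r
    unfold pvAinv
    split <;> rfl
  rw [hb, PySem.List.foldl_append_singleton_eq_map]
  simp

theorem listLoop_spec (E : List (String × List (List String))) :
    ∀ (js : List Nat) (ev : List (String × List (List String))) (i : Nat)
      (tr : List (List String)), pvRelE E ev →
    pvRelE E (pvA_listLoop ev i tr js).1 ∧
    (pvA_listLoop ev i tr js).2 = js.foldl (fun tr j =>
      pvStep E tr (E.getD i ("", [])).1 ((E.getD i ("", [])).2.getD j [])) tr := by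
  intro js
  induction js with
  | nil => intro ev i tr h; exact ⟨h, rfl⟩
  | cons j rest ih =>
    intro ev i tr h
    obtain ⟨hname, hrels⟩ :=
      forall2_getD (d := ("", [])) (d' := ("", [])) h ⟨rfl, List.Forall₂.nil⟩ i
    have hperm : ((E.getD i ("", [])).2.getD j []).Perm ((ev.getD i ("", [])).2.getD j []) :=
      forall2_getD hrels (List.Perm.refl []) j
    have hsr : pvSortS (((ev.getD i ("", [])).2.getD j []).foldl (fun acc r =>
        if pvStartsTilde r = false then acc ++ ["~" ++ r] else acc ++ [pvReplaceTilde1 r]) []) =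
        pvSig ((E.getD i ("", [])).2.getD j []) := by
      rw [foldinv_eq_map]
      exact (pvSortS_congr (hperm.map pvAinv)).symm
    simp only [pvA_listLoop, hsr, ← hname]
    obtain ⟨out, heq, hrel2, hnom⟩ :=
      scanEntities_spec (E.getD i ("", [])).1 (pvSig ((E.getD i ("", [])).2.getD j [])) ev [] tr false
    rw [heq]
    simp only [List.nil_append, Bool.false_or, List.foldl_cons]
    rw [anyEnt_congr h]
    have hmc : (ev.filter (fun p => p.2.any (fun er =>
          pvSig ((E.getD i ("", [])).2.getD j []) == pvSortS er))).map Prod.fst =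
        pvMatched E (pvSig ((E.getD i ("", [])).2.getD j [])) :=
      pvMatched_congr h _
    by_cases hq : E.any (fun p => p.2.any (fun er =>
        pvSig ((E.getD i ("", [])).2.getD j []) == pvSortS er))
    · have hstep : pvStep E tr (E.getD i ("", [])).1 ((E.getD i ("", [])).2.getD j []) =
          pvEmit tr (E.getD i ("", [])).1 (pvSig ((E.getD i ("", [])).2.getD j []))
            (pvMatched E (pvSig ((E.getD i ("", [])).2.getD j []))) := by
        simp only [pvStep]
        rw [matched_isEmpty, hq]
        simp only [Bool.not_true, Bool.false_eq_true, if_false]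
      rw [hq, if_pos rfl, hmc, ← hstep]
      exact ih out i _ (pvRelE_trans h hrel2)
    · simp only [Bool.not_eq_true] at hq
      rw [hq]
      simp only [Bool.false_eq_true, if_false]
      have hout : out = ev.map (fun p => (p.1, p.2.map pvSortS)) := by
        apply hnom
        rw [anyEnt_congr h, hq]
      have hms : pvMatched E (pvSig ((E.getD i ("", [])).2.getD j [])) = [] := by
        have := matched_isEmpty E (pvSig ((E.getD i ("", [])).2.getD j []))
        rw [hq] at this
        simpa using this
      have hfb : ((out.getD i ("", [])).2.getD j []) =
          pvSortS ((E.getD i ("", [])).2.getD j []) := by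
        rw [hout, getD_map_fix (fun p => (p.1, p.2.map pvSortS)) ("", []) ("", []) rfl]
        rw [getD_map_fix pvSortS [] [] rfl]
        exact (pvSortS_congr hperm).symm
      have hstep : pvStep E tr (E.getD i ("", [])).1 ((E.getD i ("", [])).2.getD j []) =
          pvA_fallback tr (E.getD i ("", [])).1 (pvSortS ((E.getD i ("", [])).2.getD j [])) := by
        simp only [pvStep]
        rw [matched_isEmpty, hq]
        simp only [Bool.not_false, if_true]
      rw [hmc, hms, hfb]
      simp only [pvEmit, List.foldl_nil]
      rw [← hstep]
      exact ih out i _ (pvRelE_trans h hrel2)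

theorem entLoop_spec (E : List (String × List (List String))) :
    ∀ (is : List Nat) (ev : List (String × List (List String))) (tr : List (List String)),
      pvRelE E ev →
    (pvA_entLoop ev tr is).2 = is.foldl (fun tr i =>
      (List.range ((E.getD i ("", [])).2.length)).foldl (fun tr j =>
        pvStep E tr (E.getD i ("", [])).1 ((E.getD i ("", [])).2.getD j [])) tr) tr := by
  intro is
  induction is with
  | nil => intro ev tr _; rfl
  | cons i rest ih =>
    intro ev tr h
    obtain ⟨hname, hrels⟩ :=
      forall2_getD (d := ("", [])) (d' := ("", [])) h ⟨rfl, List.Forall₂.nil⟩ i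
    have hlen : (ev.getD i ("", [])).2.length = (E.getD i ("", [])).2.length :=
      (List.Forall₂.length_eq hrels).symm
    simp only [pvA_entLoop, hlen, List.foldl_cons]
    obtain ⟨h1, h2⟩ := listLoop_spec E (List.range ((E.getD i ("", [])).2.length)) ev i tr h
    rw [h2]
    exact ih _ _ h1

theorem pvA_eq_spec (E : List (String × List (List String))) :
    evidence2triples E = pvSpec E := by
  have h1 := entLoop_spec E (List.range E.length) E [] (pvRelE_refl E)
  have h2 : (List.range E.length).foldl (fun tr i =>
      (List.range ((E.getD i ("", [])).2.length)).foldl (fun tr j =>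
        pvStep E tr (E.getD i ("", [])).1 ((E.getD i ("", [])).2.getD j [])) tr) [] =
      E.foldl (fun tr p => (List.range p.2.length).foldl (fun tr j =>
        pvStep E tr p.1 (p.2.getD j [])) tr) [] :=
    foldl_range_getD E ("", [])
      (fun tr p => (List.range p.2.length).foldl (fun tr j =>
        pvStep E tr p.1 (p.2.getD j [])) tr) []
  have h3 : E.foldl (fun tr p => (List.range p.2.length).foldl (fun tr j =>
        pvStep E tr p.1 (p.2.getD j [])) tr) [] = pvSpec E := by
    unfold pvSpec
    congr 1
    funext tr p
    exact foldl_range_getD p.2 [] (fun tr er => pvStep E tr p.1 er) tr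
  unfold evidence2triples
  rw [h1, h2, h3]

-- ---------- B: the index dictionary ----------
theorem set_contains_eq_mem_decide {α : Type} [BEq α] [LawfulBEq α] (s : PySem.Set α) (k : α) :
    PySem.Set.contains s k = decide (k ∈ s) := by
  by_cases h : k ∈ s
  · rw [(PySem.Set.contains_iff s k).mpr h]
    simp [h]
  · simp only [h, decide_false]
    exact Bool.eq_false_iff.mpr (fun hc => h ((PySem.Set.contains_iff s k).mp hc))

theorem set_contains_add {α : Type} [BEq α] [LawfulBEq α] (s : PySem.Set α) (x k : α) :
    PySem.Set.contains (PySem.Set.add s x) k = (PySem.Set.contains s k || k == x) := by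
  simp only [set_contains_eq_mem_decide, PySem.Set.mem_add]
  by_cases h1 : k ∈ s
  · simp [h1]
  · by_cases h2 : k = x <;> simp [h1, h2]

theorem set_contains_empty {α : Type} [BEq α] [LawfulBEq α] (k : α) :
    PySem.Set.contains (PySem.Set.empty : PySem.Set α) k = false := by
  rw [set_contains_eq_mem_decide]
  simp [PySem.Set.empty]

theorem bIndex_inner (e : String) :
    ∀ (rels : List (List String)) (d : PySem.Dict (List String) (List String))
      (s : PySem.Set (List String)) (k : List String),
    ((rels.foldl (fun (q : PySem.Dict (List String) (List String) × PySem.Set (List String)) er =>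
        let key := pvSortS er
        if PySem.Set.contains q.2 key then q
        else (q.1.insert key (q.1.getD key [] ++ [e]), PySem.Set.add q.2 key)) (d, s)).1).getD k [] =
      if (!(PySem.Set.contains s k) && rels.any (fun er => k == pvSortS er)) = true
      then d.getD k [] ++ [e] else d.getD k [] := by
  intro rels
  induction rels with
  | nil => intro d s k; simp
  | cons er rest ih =>
    intro d s k
    simp only [List.foldl_cons, List.any_cons]
    by_cases hc : PySem.Set.contains s (pvSortS er) = true
    · rw [if_pos hc, ih d s k]
      have hm : pvSortS er ∈ s := (PySem.Set.contains_iff s (pvSortS er)).mp hc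
      by_cases hk : k = pvSortS er
      · subst hk
        simp [hm]
      · simp [beq_eq_false_iff_ne.mpr hk]
    · have hcf : PySem.Set.contains s (pvSortS er) = false := by simpa using hc
      have hnm : pvSortS er ∉ s :=
        fun hmm => absurd ((PySem.Set.contains_iff s (pvSortS er)).mpr hmm) hc
      rw [if_neg hc, ih]
      by_cases hk : k = pvSortS er
      · subst hk
        simp [hnm, PySem.Dict.getD_insert_self]
      · simp only [set_contains_add, beq_eq_false_iff_ne.mpr hk, Bool.or_false,
          PySem.Dict.getD_insert_of_ne d _ [] hk, Bool.false_or]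

theorem bIndex_getD (k : List String) :
    ∀ (E : List (String × List (List String))) (d : PySem.Dict (List String) (List String)),
    ((E.foldl (fun d p =>
      (p.2.foldl (fun (q : PySem.Dict (List String) (List String) × PySem.Set (List String)) er =>
          let key := pvSortS er
          if PySem.Set.contains q.2 key then q
          else (q.1.insert key (q.1.getD key [] ++ [p.1]), PySem.Set.add q.2 key))
        (d, PySem.Set.empty)).1) d)).getD k [] = d.getD k [] ++ pvMatched E k := by
  intro E
  induction E with
  | nil => intro d; simp [pvMatched]
  | cons p rest ih =>
    intro d
    simp only [List.foldl_cons]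
    rw [ih, bIndex_inner p.1 p.2 d PySem.Set.empty k, set_contains_empty]
    unfold pvMatched
    simp only [List.filter_cons]
    by_cases hq : (p.2.any (fun er => k == pvSortS er)) = true
    · simp [hq]
    · have hqf : (p.2.any (fun er => k == pvSortS er)) = false := by simpa using hq
      simp [hqf]

theorem index_getD (E : List (String × List (List String))) (k : List String) :
    (pvB_index E).getD k [] = pvMatched E k := by
  unfold pvB_index
  rw [bIndex_getD, PySem.Dict.getD_empty]
  simp

-- ---------- B: the main loop and its dedup-set invariant ----------
def pvInv (st : List (List String) × PySem.Set (List String)) : Prop :=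
  ∀ t, t ∈ st.2 ↔ t ∈ st.1

theorem genFold {σ : Type}
    (f : List (List String) → σ → List (List String))
    (g : List (List String) × PySem.Set (List String) → σ →
      List (List String) × PySem.Set (List String))
    (hyp : ∀ st x, pvInv st → (g st x).1 = f st.1 x ∧ pvInv (g st x)) :
    ∀ (l : List σ) (st : List (List String) × PySem.Set (List String)), pvInv st →
      (l.foldl g st).1 = l.foldl f st.1 ∧ pvInv (l.foldl g st) := by
  intro l
  induction l with
  | nil => intro st h; exact ⟨rfl, h⟩
  | cons x rest ih =>
    intro st h
    obtain ⟨h1, h2⟩ := hyp st x h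
    simp only [List.foldl_cons]
    obtain ⟨h3, h4⟩ := ih (g st x) h2
    rw [h3, h1]
    exact ⟨rfl, h4⟩

theorem pvB_add_spec (st : List (List String) × PySem.Set (List String)) (t : List String)
    (h : pvInv st) :
    (pvB_add st t).1 = (if st.1.contains t then st.1 else st.1 ++ [t]) ∧ pvInv (pvB_add st t) := by
  have hc : PySem.Set.contains st.2 t = st.1.contains t := by
    rw [set_contains_eq_mem_decide, List.contains_eq_mem]
    simp [h t]
  unfold pvB_add
  rw [hc]
  split
  · exact ⟨rfl, h⟩
  · refine ⟨rfl, fun t' => ?_⟩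
    simp only [PySem.Set.mem_add, List.mem_append, List.mem_singleton, h t']

theorem bRel_fold (e1 e2 : String) (sig : List String)
    (st : List (List String) × PySem.Set (List String)) (h : pvInv st) :
    ((sig.foldl (fun st rel =>
        if pvStartsTilde rel = false then pvB_add st [e2, rel, e1]
        else pvB_add st [e1, pvStrTail rel, e2]) st).1 = pvA_addTriples st.1 e1 e2 sig) ∧
    pvInv (sig.foldl (fun st rel =>
        if pvStartsTilde rel = false then pvB_add st [e2, rel, e1]
        else pvB_add st [e1, pvStrTail rel, e2]) st) := by
  apply genFold (fun tr rel =>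
      if pvStartsTilde rel = false then
        if tr.contains [e2, rel, e1] then tr else tr ++ [[e2, rel, e1]]
      else
        if tr.contains [e1, pvReplaceTilde1 rel, e2] then tr
        else tr ++ [[e1, pvReplaceTilde1 rel, e2]]) _ ?_ sig st h
  intro st' rel h'
  by_cases hr : pvStartsTilde rel = false
  · simp only [hr, if_true]
    exact pvB_add_spec st' [e2, rel, e1] h'
  · have hrt : pvStartsTilde rel = true := by simpa using hr
    simp only [hr, Bool.true_eq_false, if_false, pvTail_eq hrt]
    exact pvB_add_spec st' [e1, pvStrTail rel, e2] h'

theorem bEnts_fold (e1 : String) (sig : List String) (names : List String)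
    (st : List (List String) × PySem.Set (List String)) (h : pvInv st) :
    ((names.foldl (fun st e2 =>
        sig.foldl (fun st rel =>
          if pvStartsTilde rel = false then pvB_add st [e2, rel, e1]
          else pvB_add st [e1, pvStrTail rel, e2]) st) st).1 = pvEmit st.1 e1 sig names) ∧
    pvInv (names.foldl (fun st e2 =>
        sig.foldl (fun st rel =>
          if pvStartsTilde rel = false then pvB_add st [e2, rel, e1]
          else pvB_add st [e1, pvStrTail rel, e2]) st) st) := by
  apply genFold (fun tr e2 => pvA_addTriples tr e1 e2 sig) _ ?_ names st h
  intro st' e2 h'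
  exact bRel_fold e1 e2 sig st' h'

theorem bFb_fold (e1 : String) (l : List String)
    (st : List (List String) × PySem.Set (List String)) (h : pvInv st) :
    ((l.foldl (fun st r =>
        if pvStartsTilde r = false then
          (st.1 ++ [[e1, r, "-"]], PySem.Set.add st.2 [e1, r, "-"])
        else
          (st.1 ++ [["-", pvStrTail r, e1]], PySem.Set.add st.2 ["-", pvStrTail r, e1])) st).1 =
      pvA_fallback st.1 e1 l) ∧
    pvInv (l.foldl (fun st r =>
        if pvStartsTilde r = false then
          (st.1 ++ [[e1, r, "-"]], PySem.Set.add st.2 [e1, r, "-"])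
        else
          (st.1 ++ [["-", pvStrTail r, e1]], PySem.Set.add st.2 ["-", pvStrTail r, e1])) st) := by
  apply genFold (fun tr rel =>
      if pvStartsTilde rel = false then tr ++ [[e1, rel, "-"]]
      else tr ++ [["-", pvReplaceTilde1 rel, e1]]) _ ?_ l st h
  intro st' r h'
  by_cases hr : pvStartsTilde r = false
  · simp only [hr, if_true]
    refine ⟨by trivial, fun t' => ?_⟩
    simp only [PySem.Set.mem_add, List.mem_append, List.mem_singleton, h' t']
  · have hrt : pvStartsTilde r = true := by simpa using hr
    simp only [hr, Bool.true_eq_false, if_false, pvTail_eq hrt]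
    refine ⟨by trivial, fun t' => ?_⟩
    simp only [PySem.Set.mem_add, List.mem_append, List.mem_singleton, h' t']

theorem bStep_spec (E : List (String × List (List String))) (e1 : String) (er : List String)
    (st : List (List String) × PySem.Set (List String)) (h : pvInv st) :
    (((fun st (er : List String) =>
      let sig := pvSortS (er.map pvB_invert)
      let entities := (pvB_index E).getD sig []
      if entities.isEmpty then
        (pvSortS er).foldl (fun st r =>
          if pvStartsTilde r = false then
            (st.1 ++ [[e1, r, "-"]], PySem.Set.add st.2 [e1, r, "-"])
          else
            (st.1 ++ [["-", pvStrTail r, e1]], PySem.Set.add st.2 ["-", pvStrTail r, e1])) st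
      else
        entities.foldl (fun st e2 =>
          sig.foldl (fun st rel =>
            if pvStartsTilde rel = false then pvB_add st [e2, rel, e1]
            else pvB_add st [e1, pvStrTail rel, e2]) st) st) st er).1 =
      pvStep E st.1 e1 er) ∧
    pvInv ((fun st (er : List String) =>
      let sig := pvSortS (er.map pvB_invert)
      let entities := (pvB_index E).getD sig []
      if entities.isEmpty then
        (pvSortS er).foldl (fun st r =>
          if pvStartsTilde r = false then
            (st.1 ++ [[e1, r, "-"]], PySem.Set.add st.2 [e1, r, "-"])
          else
            (st.1 ++ [["-", pvStrTail r, e1]], PySem.Set.add st.2 ["-", pvStrTail r, e1])) st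
      else
        entities.foldl (fun st e2 =>
          sig.foldl (fun st rel =>
            if pvStartsTilde rel = false then pvB_add st [e2, rel, e1]
            else pvB_add st [e1, pvStrTail rel, e2]) st) st) st er) := by
  have hsig : pvSortS (er.map pvB_invert) = pvSig er := by
    rw [pvBinv_eq]; rfl
  simp only [hsig, index_getD E (pvSig er), pvStep]
  by_cases he : (pvMatched E (pvSig er)).isEmpty = true
  · simp only [he, if_true]
    exact bFb_fold e1 (pvSortS er) st h
  · simp only [he, Bool.false_eq_true, if_false]
    exact bEnts_fold e1 (pvSig er) (pvMatched E (pvSig er)) st h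

theorem pvB_eq_spec (E : List (String × List (List String))) :
    evidence2triples_alt E = pvSpec E := by
  unfold evidence2triples_alt pvSpec
  have hmain := genFold
    (fun tr p => p.2.foldl (fun tr er => pvStep E tr p.1 er) tr)
    (fun st (p : String × List (List String)) =>
      p.2.foldl (fun st er =>
        let sig := pvSortS (er.map pvB_invert)
        let entities := (pvB_index E).getD sig []
        if entities.isEmpty then
          (pvSortS er).foldl (fun st r =>
            if pvStartsTilde r = false then
              (st.1 ++ [[p.1, r, "-"]], PySem.Set.add st.2 [p.1, r, "-"])
            else
              (st.1 ++ [["-", pvStrTail r, p.1]], PySem.Set.add st.2 ["-", pvStrTail r, p.1])) st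
        else
          entities.foldl (fun st e2 =>
            sig.foldl (fun st rel =>
              if pvStartsTilde rel = false then pvB_add st [e2, rel, p.1]
              else pvB_add st [p.1, pvStrTail rel, e2]) st) st) st)
    ?_ E ([], PySem.Set.empty) ?_
  · exact hmain.1
  · intro st p h
    exact genFold (fun tr er => pvStep E tr p.1 er) _
      (fun st' er h' => bStep_spec E p.1 er st' h') p.2 st h
  · intro t
    simp [PySem.Set.empty]

-- ===== VERDICT (by name: the statement is the Claim_ definition above) =====
theorem evidence2triples_spec : Claim_equal_evidence2triples := by
  intro E _ _
  unfold Spec_evidence2triples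
  rw [pvA_eq_spec, pvB_eq_spec]
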